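-- pv_equiv track=rewrite | github.com/dafish-ai/NTU-Machine-learning | 李宏毅机器学习-作业/HW5/Base/Utility.py | countSingleLabelCorrespondMovieNum
-- ===== SOURCE A (Python) =====
-- def countSingleLabelCorrespondMovieNum(pdDataLableColumn):
--     '''
--     This function counts the number of movies in each Single label
--     '''
--     dictSingleGenres = {} # 個別一類電影數
--     listSingleGenres = [] # 電影個別一類分類
--     for d in pdDataLableColumn:
--         for g in d.split("|"):
--             if g not in listSingleGenres:
--                 listSingleGenres.append(g)
--                 dictSingleGenres[str(g)] = 1
--             else:
--                 dictSingleGenres[str(g)] += 1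
--     return dictSingleGenres
-- ===== SOURCE B (Python) =====
-- def countSingleLabelCorrespondMovieNum(pdDataLableColumn):
--     '''
--     Counts movies per single label in two staged passes: first flatten all
--     "|"-separated tokens and derive the distinct labels in first-occurrence
--     order (dict.fromkeys), then count each label over the flattened token
--     list with list.count.  No incremental tally state is maintained.
--     '''
--     tokens = [g for d in pdDataLableColumn for g in d.split("|")]
--     return {k: tokens.count(k) for k in dict.fromkeys(tokens)}
-- ===== Notes on version B (the rewrite author's own statement) =====
-- stated objective: alternative
-- what changed: Replaces A's single incremental pass (seen-list membership plus running dict tally) by two staged passes: flatten all tokens, take the distinct labels via dict.fromkeys, then count each label with list.count over the flattened list.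
import Mathlib
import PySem

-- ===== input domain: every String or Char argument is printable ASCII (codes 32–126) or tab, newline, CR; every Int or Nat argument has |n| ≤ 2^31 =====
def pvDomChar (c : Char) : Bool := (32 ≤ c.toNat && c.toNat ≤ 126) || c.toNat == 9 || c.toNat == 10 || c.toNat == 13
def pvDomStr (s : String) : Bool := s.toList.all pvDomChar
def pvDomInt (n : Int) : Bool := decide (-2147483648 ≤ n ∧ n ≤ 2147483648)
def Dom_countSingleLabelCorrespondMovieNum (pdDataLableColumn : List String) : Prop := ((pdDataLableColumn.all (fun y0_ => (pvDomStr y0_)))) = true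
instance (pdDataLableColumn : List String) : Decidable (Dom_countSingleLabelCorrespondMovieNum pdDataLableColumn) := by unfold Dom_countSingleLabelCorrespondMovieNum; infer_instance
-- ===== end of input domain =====

-- B replaces A's incremental tally (seen-list + running dict) by two staged passes:
-- flatten the tokens, dedupe to first-occurrence keys, count each key over the flat list.

-- ===== PORT A =====
-- d.split("|") = PySem.Str.split? d "|" (some, since "|" ≠ ""); str(g) on a str is g itself;
-- dictSingleGenres[g] += 1 is ported as Dict.modify g 0 (· + 1): exact here, since the loop
-- keeps every member of listSingleGenres a key of the dict, so the key is always present.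
def countSingleLabelCorrespondMovieNum (pdDataLableColumn : List String) : List (String × Int) :=
  (pdDataLableColumn.foldl
    (fun (st : PySem.Dict String Int × List String) d =>
      ((PySem.Str.split? d "|").getD []).foldl
        (fun st g =>
          if g ∉ st.2 then (st.1.insert g 1, st.2 ++ [g])
          else (st.1.modify g 0 (· + 1), st.2))
        st)
    (PySem.Dict.empty, [])).1.items

-- ===== PORT B =====
-- tokens = flattened comprehension; dict.fromkeys(tokens) = PySem.List.dedup tokens;
-- the dict comprehension builds the dict by inserting tokens.count(k) at each key k.
def countSingleLabelCorrespondMovieNum_alt (pdDataLableColumn : List String) : List (String × Int) :=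
  let tokens := pdDataLableColumn.flatMap (fun d => (PySem.Str.split? d "|").getD [])
  ((PySem.List.dedup tokens).foldl
      (fun d k => d.insert k ((tokens.count k : Int))) PySem.Dict.empty).items

-- ===== PRECONDITION & SPEC =====
def Spec_countSingleLabelCorrespondMovieNum (pdDataLableColumn : List String) (out : List (String × Int)) : Prop := out = countSingleLabelCorrespondMovieNum_alt pdDataLableColumn
instance (pdDataLableColumn : List String) (out : List (String × Int)) : Decidable (Spec_countSingleLabelCorrespondMovieNum pdDataLableColumn out) := by unfold Spec_countSingleLabelCorrespondMovieNum; infer_instance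

-- ===== CLAIM (what is proved, stated in full; the proofs are below) =====
def Claim_equal_countSingleLabelCorrespondMovieNum : Prop := ∀ (pdDataLableColumn : List String), Dom_countSingleLabelCorrespondMovieNum pdDataLableColumn → Spec_countSingleLabelCorrespondMovieNum pdDataLableColumn (countSingleLabelCorrespondMovieNum pdDataLableColumn)

-- ===== LEMMAS AND PROOFS =====

-- A's token-level step function
def pvStepA (st : PySem.Dict String Int × List String) (g : String) :
    PySem.Dict String Int × List String :=
  if g ∉ st.2 then (st.1.insert g 1, st.2 ++ [g])
  else (st.1.modify g 0 (· + 1), st.2)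

-- nested row/token foldl = one foldl over the flattened token stream
theorem pv_foldl_flatMap {α β γ : Type} (f : α → List β) (g : γ → β → γ) :
    ∀ (l : List α) (init : γ),
      (l.flatMap f).foldl g init = l.foldl (fun s a => (f a).foldl g s) init := by
  intro l
  induction l with
  | nil => intro init; simp
  | cons a l ih => intro init; simp [List.flatMap_cons, List.foldl_append, ih]

-- invariant: starting from the state produced by the tokens ys, A's loop over xs
-- yields the counter and the ordered-distinct list of ys ++ xs
theorem pv_loop_inv (xs : List String) :
    ∀ ys : List String,
      xs.foldl pvStepA (PySem.Dict.counter ys, PySem.Set.ofList ys)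
        = (PySem.Dict.counter (ys ++ xs), PySem.Set.ofList (ys ++ xs)) := by
  induction xs with
  | nil => intro ys; simp
  | cons x xs ih =>
    intro ys
    have hstep : pvStepA (PySem.Dict.counter ys, PySem.Set.ofList ys) x
        = (PySem.Dict.counter (ys ++ [x]), PySem.Set.ofList (ys ++ [x])) := by
      by_cases hx : x ∈ ys
      · have hmem : x ∈ PySem.Set.ofList ys := (PySem.Set.mem_ofList ys x).2 hx
        simp [pvStepA, hmem, PySem.Dict.counter_append_singleton,
          PySem.Set.ofList_append_singleton]
      · have hmem : x ∉ PySem.Set.ofList ys := fun h => hx ((PySem.Set.mem_ofList ys x).1 h)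
        have hc : (PySem.Dict.counter ys).getD x 0 = 0 := by
          simp [PySem.Dict.getD_counter, List.count_eq_zero.2 hx]
        simp [pvStepA, hmem, PySem.Dict.counter_append_singleton,
          PySem.Dict.modify, hc, PySem.Set.ofList_append_singleton]
    rw [List.foldl_cons, hstep, ih (ys ++ [x]), List.append_assoc]
    simp

theorem pv_portA_eq_counter (pdDataLableColumn : List String) :
    countSingleLabelCorrespondMovieNum pdDataLableColumn
      = (PySem.Dict.counter
          (pdDataLableColumn.flatMap (fun d => (PySem.Str.split? d "|").getD []))).items := by
  unfold countSingleLabelCorrespondMovieNum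
  rw [show (fun (st : PySem.Dict String Int × List String) g =>
        if g ∉ st.2 then (st.1.insert g 1, st.2 ++ [g])
        else (st.1.modify g 0 (· + 1), st.2)) = pvStepA from rfl]
  rw [← pv_foldl_flatMap (fun d => (PySem.Str.split? d "|").getD []) pvStepA]
  have h0 : (PySem.Dict.empty, ([] : List String))
      = ((PySem.Dict.counter ([] : List String)), PySem.Set.ofList ([] : List String)) := rfl
  rw [h0, pv_loop_inv _ []]
  simp

-- B's staged build over distinct keys appends one pair per key
theorem pv_portB_eq_map (pdDataLableColumn : List String) :
    countSingleLabelCorrespondMovieNum_alt pdDataLableColumn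
      = (PySem.Set.ofList
          (pdDataLableColumn.flatMap (fun d => (PySem.Str.split? d "|").getD []))).map
          (fun k => (k, ((pdDataLableColumn.flatMap
              (fun d => (PySem.Str.split? d "|").getD [])).count k : Int))) := by
  unfold countSingleLabelCorrespondMovieNum_alt
  rw [PySem.Dict.items_foldl_insert_fresh]
  · rfl
  · intro a _; simp [PySem.Dict.contains_empty]
  · simp [PySem.Set.nodup_ofList]

-- ===== VERDICT (by name: the statement is the Claim_ definition above) =====
theorem countSingleLabelCorrespondMovieNum_spec : Claim_equal_countSingleLabelCorrespondMovieNum := by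
  intro pdDataLableColumn _
  unfold Spec_countSingleLabelCorrespondMovieNum
  rw [pv_portA_eq_counter, pv_portB_eq_map, PySem.Dict.items_counter]
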